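-- pv_equiv track=rewrite | github.com/raeez/chiral-bar-cobar | compute/lib/bar_cohomology_y111_explicit_engine.py | bar_chain_table
-- ===== SOURCE A (Python) =====
-- from typing import Dict, List, Optional, Tuple
--
-- def vacuum_module_dims(max_weight: int) -> Dict[int, int]:
--     r"""Dimensions of the vacuum module at each weight.
--
--     Computed via generating function convolution (independent of
--     the explicit basis enumeration, for cross-validation).
--
--     GF = prod_{n>=1} 1/(1-q^n) * prod_{n>=2} 1/(1-q^n)
--     """
--     # J-sector: partitions into parts >= 1 (= all partitions)
--     j_dims = [0] * (max_weight + 1)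
--     j_dims[0] = 1
--     for n in range(1, max_weight + 1):
--         for k in range(n, max_weight + 1):
--             j_dims[k] += j_dims[k - n]
--
--     # T-sector: partitions into parts >= 2
--     t_dims = [0] * (max_weight + 1)
--     t_dims[0] = 1
--     for n in range(2, max_weight + 1):
--         for k in range(n, max_weight + 1):
--             t_dims[k] += t_dims[k - n]
--
--     # Convolution
--     total = [0] * (max_weight + 1)
--     for i in range(max_weight + 1):
--         for j in range(max_weight + 1 - i):
--             total[i + j] += j_dims[i] * t_dims[j]
--
--     return {h: total[h] for h in range(max_weight + 1)}
--
-- def vbar_dims(max_weight: int) -> Dict[int, int]: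
--     r"""Dimensions of V-bar = (vacuum module) minus vacuum.
--
--     V-bar_h = V_h for h >= 1, and V-bar_0 = 0.
--     """
--     vdims = vacuum_module_dims(max_weight)
--     result = {}
--     for h in range(1, max_weight + 1):
--         result[h] = vdims[h]
--     return result
--
-- def bar_chain_dim_y111(n: int, h: int, max_h: int = 20) -> int:
--     r"""Dimension of the bar chain group B^n_h for Y_{1,1,1}.
--
--     B^n = V-bar^{tensor(n+1)} x OS^n(Conf_{n+1}(C))
--     dim B^n_h = (number of ordered (n+1)-tuples at weight h) * n!
--
--     V-bar has generators starting at weight 1 (unlike Virasoro where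
--     generators start at weight 2).  So the minimum weight for B^n is n+1.
--     """
--     from math import factorial
--
--     vb = vbar_dims(max_h)
--
--     if h < (n + 1):  # minimum weight: each factor >= 1
--         return 0
--
--     # Convolution: count ordered (n+1)-tuples
--     prev = {0: 1}
--     for _ in range(n + 1):
--         curr: Dict[int, int] = {}
--         for hp, cp in prev.items():
--             for hw in range(1, h - hp + 1):
--                 dw = vb.get(hw, 0)
--                 if dw == 0:
--                     continue
--                 ht = hp + hw
--                 if ht > h:
--                     break
--                 curr[ht] = curr.get(ht, 0) + cp * dw
--         prev = curr
--
--     tuple_count = prev.get(h, 0)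
--     os_dim = factorial(n) if n > 0 else 1
--     return tuple_count * os_dim
--
-- def bar_chain_table(max_n: int = 3, max_h: int = 10) -> Dict[Tuple[int, int], int]:
--     """Compute bar chain group dimensions B^n_h for all n, h."""
--     result = {}
--     for n in range(0, max_n + 1):
--         for h in range(n + 1, max_h + 1):
--             d = bar_chain_dim_y111(n, h, max_h)
--             if d > 0:
--                 result[(n, h)] = d
--     return result
-- ===== SOURCE B (Python) =====
-- def _vbar_totals(max_h):
--     """total[h] = dim of the vacuum module at weight h (generating-function
--     convolution as in the module); total[h] for h >= 1 are the V-bar dims."""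
--     j = [0] * (max_h + 1)
--     j[0] = 1
--     for n in range(1, max_h + 1):
--         for k in range(n, max_h + 1):
--             j[k] += j[k - n]
--     t = [0] * (max_h + 1)
--     t[0] = 1
--     for n in range(2, max_h + 1):
--         for k in range(n, max_h + 1):
--             t[k] += t[k - n]
--     total = [0] * (max_h + 1)
--     for i in range(max_h + 1):
--         for jj in range(max_h + 1 - i):
--             total[i + jj] += j[i] * t[jj]
--     return total
--
--
-- def bar_chain_table(max_n: int = 3, max_h: int = 10):
--     """Compute bar chain group dimensions B^n_h for all n, h.
--
--     Single DP: compute the V-bar dims once, then build the ordered-tuple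
--     counts for (n+1) tensor factors incrementally by one convolution per n,
--     reading off the whole row h = n+1 .. max_h each time.
--     """
--     if max_n < 0 or max_h < 1:
--         return {}  # no (n, h) cells to tabulate
--     vb = _vbar_totals(max_h)  # vb[w] for w >= 1
--     result = {}
--     counts = [0] * (max_h + 1)
--     counts[0] = 1  # counts[w] = number of ordered 0-tuples of weight w
--     fact = 1
--     for n in range(0, min(max_n, max_h - 1) + 1):  # rows with n + 1 > max_h are empty
--         new = [0] * (max_h + 1)
--         for w in range(0, max_h + 1):
--             c = counts[w]
--             if c:
--                 for hw in range(1, max_h + 1 - w):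
--                     new[w + hw] += c * vb[hw]
--         counts = new  # ordered (n+1)-tuple counts by weight
--         if n > 0:
--             fact *= n  # fact = n!
--         for h in range(n + 1, max_h + 1):
--             d = counts[h] * fact
--             if d > 0:
--                 result[(n, h)] = d
--     return result
-- ===== Notes on version B (the rewrite author's own statement) =====
-- stated objective: faster
-- what changed: A recomputes the full vacuum-module generating-function tables and reruns the whole (n+1)-fold dict convolution from scratch for every single cell (n, h); B computes the V-bar weight table once and maintains one array of ordered-tuple counts, extending it by a single convolution per n and reading off each whole row, with a running factorial.
import Mathlib
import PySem

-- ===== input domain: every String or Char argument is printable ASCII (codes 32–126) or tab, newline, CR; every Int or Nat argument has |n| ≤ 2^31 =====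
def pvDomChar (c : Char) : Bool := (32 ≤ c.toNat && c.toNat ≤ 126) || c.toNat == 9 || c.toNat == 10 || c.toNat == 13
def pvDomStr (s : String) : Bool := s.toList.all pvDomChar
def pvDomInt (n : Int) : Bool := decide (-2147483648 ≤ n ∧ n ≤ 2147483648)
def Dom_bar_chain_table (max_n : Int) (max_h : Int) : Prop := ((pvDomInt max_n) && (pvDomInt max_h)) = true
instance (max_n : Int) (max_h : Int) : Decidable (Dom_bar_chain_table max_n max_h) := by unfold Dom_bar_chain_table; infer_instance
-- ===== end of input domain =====

-- B computes the V-bar dimension table once and builds all ordered-tuple counts by one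
-- convolution DP per n (reading off whole rows), instead of A's per-(n,h) reconvolution.

-- ===== PORT A =====
-- A's vacuum_module_dims, split into its three intermediate lists (j-sector, t-sector,
-- convolution); every index written .toNat is nonnegative and in range whenever the
-- entry point reaches this code (max_weight = max_h ≥ 1 there), so set/getD are exact.
def pvJDims (mw : Int) : List Int :=
  (PySem.List.pyRange 1 (mw+1) 1).foldl (fun d n =>
    (PySem.List.pyRange n (mw+1) 1).foldl (fun d k =>
        d.set k.toNat (d.getD k.toNat 0 + d.getD (k-n).toNat 0)) d)
    ((List.replicate (mw+1).toNat 0).set 0 1)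

def pvTDims (mw : Int) : List Int :=
  (PySem.List.pyRange 2 (mw+1) 1).foldl (fun d n =>
    (PySem.List.pyRange n (mw+1) 1).foldl (fun d k =>
        d.set k.toNat (d.getD k.toNat 0 + d.getD (k-n).toNat 0)) d)
    ((List.replicate (mw+1).toNat 0).set 0 1)

def pvTotal (mw : Int) : List Int :=
  let j := pvJDims mw
  let t := pvTDims mw
  (PySem.List.pyRange 0 (mw+1) 1).foldl (fun tot i =>
    (PySem.List.pyRange 0 (mw+1-i) 1).foldl (fun tot jj =>
      tot.set (i+jj).toNat (tot.getD (i+jj).toNat 0 + j.getD i.toNat 0 * t.getD jj.toNat 0)) tot)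
    (List.replicate (mw+1).toNat 0)

def vacuum_module_dims (mw : Int) : PySem.Dict Int Int :=
  let total := pvTotal mw
  (PySem.List.pyRange 0 (mw+1) 1).foldl (fun d h => d.insert h (total.getD h.toNat 0)) PySem.Dict.empty

def vbar_dims (mw : Int) : PySem.Dict Int Int :=
  let v := vacuum_module_dims mw
  (PySem.List.pyRange 1 (mw+1) 1).foldl (fun r h => r.insert h (v.getD h 0)) PySem.Dict.empty

-- math.factorial(n) for n ≥ 0 (the only way A calls it), as the product 1*2*…*n
def pyFactorial (n : Int) : Int := (PySem.List.pyRange 1 (n+1) 1).foldl (· * ·) 1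

def bar_chain_dim_y111 (n h max_h : Int) : Int :=
  let vb := vbar_dims max_h
  if h < n + 1 then 0
  else
    let prev := (PySem.List.pyRange 0 (n+1) 1).foldl (fun prev _ =>
      prev.items.foldl (fun curr hpcp =>
        ((PySem.List.pyRange 1 (h - hpcp.1 + 1) 1).foldl
          (fun (st : PySem.Dict Int Int × Bool) hw =>
            if st.2 then st                                   -- a `break` already taken
            else
              let dw := vb.getD hw 0
              if dw = 0 then st                               -- `continue`
              else if hpcp.1 + hw > h then (st.1, true)       -- `break`
              else (st.1.insert (hpcp.1 + hw) (st.1.getD (hpcp.1 + hw) 0 + hpcp.2 * dw), st.2))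
          (curr, false)).1)
        PySem.Dict.empty)
      (PySem.Dict.mk [((0:Int), (1:Int))])
    let tuple_count := prev.getD h 0
    let os_dim := if n > 0 then pyFactorial n else 1
    tuple_count * os_dim

-- result dict is keyed by distinct (n, h) pairs, so insertion = append; emitted as (n, h, d)
def bar_chain_table (max_n : Int) (max_h : Int) : List (Int × Int × Int) :=
  (PySem.List.pyRange 0 (max_n+1) 1).foldl (fun res n =>
    (PySem.List.pyRange (n+1) (max_h+1) 1).foldl (fun res h =>
      let d := bar_chain_dim_y111 n h max_h
      if d > 0 then res ++ [(n, h, d)] else res) res) []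

-- ===== PORT B =====
-- Source B: V-bar totals once (its _vbar_totals computes the same three convolutions as
-- pvJDims/pvTDims/pvTotal above, so the list helper is shared), then one running DP
-- over n with state (result, counts, fact); counts is an array indexed by weight.
def bar_chain_table_alt (max_n : Int) (max_h : Int) : List (Int × Int × Int) :=
  if max_n < 0 ∨ max_h < 1 then []
  else
    -- rows with n + 1 > max_h are empty, so Source B loops n only to min(max_n, max_h - 1)
    ((PySem.List.pyRange 0 (min max_n (max_h - 1) + 1) 1).foldl
      (fun (st : List (Int × Int × Int) × List Int × Int) n =>
        let counts :=
          (PySem.List.pyRange 0 (max_h+1) 1).foldl (fun new w =>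
            let c := st.2.1.getD w.toNat 0
            if c ≠ 0 then
              (PySem.List.pyRange 1 (max_h + 1 - w) 1).foldl (fun new hw =>
                new.set (w+hw).toNat (new.getD (w+hw).toNat 0 + c * (pvTotal max_h).getD hw.toNat 0)) new
            else new)
            (List.replicate (max_h+1).toNat 0)
        let fact := if n > 0 then st.2.2 * n else st.2.2
        let res := (PySem.List.pyRange (n+1) (max_h+1) 1).foldl (fun res h =>
          let d := counts.getD h.toNat 0 * fact
          if d > 0 then res ++ [(n, h, d)] else res) st.1
        (res, counts, fact))
      ([], (List.replicate (max_h+1).toNat 0).set 0 1, 1)).1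

-- ===== PRECONDITION & SPEC =====
def Spec_bar_chain_table (max_n : Int) (max_h : Int) (out : List (Int × Int × Int)) : Prop := out = bar_chain_table_alt max_n max_h
instance (max_n : Int) (max_h : Int) (out : List (Int × Int × Int)) : Decidable (Spec_bar_chain_table max_n max_h out) := by unfold Spec_bar_chain_table; infer_instance

-- ===== CLAIM (what is proved, stated in full; the proofs are below) =====
def Claim_equal_bar_chain_table : Prop := ∀ (max_n : Int) (max_h : Int), Dom_bar_chain_table max_n max_h → Spec_bar_chain_table max_n max_h (bar_chain_table max_n max_h)

-- ===== LEMMAS AND PROOFS =====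

-- the V-bar dimension at weight w (meaningful for w ≥ 1), read off the shared totals list
def vbf (mh w : Int) : Int := (pvTotal mh).getD w.toNat 0

-- V-bar-weighted count of ordered k-tuples of weights ≥ 1 summing to x
def Tup (mh : Int) : Nat → Int → Int
  | 0, x => if x = 0 then 1 else 0
  | k+1, x => ((PySem.List.pyRange 0 x 1).map (fun i => Tup mh k i * vbf mh (x - i))).sum

-- the loop bodies of A's bar_chain_dim_y111 convolution, named (definitionally equal to the port's lambdas)
def stA (vb : PySem.Dict Int Int) (h hp cp : Int) (st : PySem.Dict Int Int × Bool) (hw : Int) :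
    PySem.Dict Int Int × Bool :=
  if st.2 then st
  else
    let dw := vb.getD hw 0
    if dw = 0 then st
    else if hp + hw > h then (st.1, true)
    else (st.1.insert (hp + hw) (st.1.getD (hp + hw) 0 + cp * dw), st.2)

def rowA (vb : PySem.Dict Int Int) (h : Int) (curr : PySem.Dict Int Int) (p : Int × Int) :
    PySem.Dict Int Int :=
  ((PySem.List.pyRange 1 (h - p.1 + 1) 1).foldl (stA vb h p.1 p.2) (curr, false)).1

def roundA (vb : PySem.Dict Int Int) (h : Int) (prev : PySem.Dict Int Int) : PySem.Dict Int Int :=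
  prev.items.foldl (rowA vb h) PySem.Dict.empty

lemma dim_eq_rounds (n h mh : Int) : bar_chain_dim_y111 n h mh =
    if h < n + 1 then 0 else
      ((PySem.List.pyRange 0 (n+1) 1).foldl (fun prev _ => roundA (vbar_dims mh) h prev)
        (PySem.Dict.mk [((0:Int), (1:Int))])).getD h 0 * (if n > 0 then pyFactorial n else 1) := rfl

-- the loop bodies of B, named
def stB (mh c w : Int) (new : List Int) (hw : Int) : List Int :=
  new.set (w+hw).toNat (new.getD (w+hw).toNat 0 + c * (pvTotal mh).getD hw.toNat 0)

def colB (mh : Int) (cnts : List Int) (new : List Int) (w : Int) : List Int :=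
  let c := cnts.getD w.toNat 0
  if c ≠ 0 then (PySem.List.pyRange 1 (mh + 1 - w) 1).foldl (stB mh c w) new else new

def stepB (mh : Int) (cnts : List Int) : List Int :=
  (PySem.List.pyRange 0 (mh+1) 1).foldl (colB mh cnts) (List.replicate (mh+1).toNat 0)

def rowOutB (mh n : Int) (counts : List Int) (fact : Int) (res : List (Int × Int × Int)) :
    List (Int × Int × Int) :=
  (PySem.List.pyRange (n+1) (mh+1) 1).foldl (fun res h =>
    let d := counts.getD h.toNat 0 * fact
    if d > 0 then res ++ [(n, h, d)] else res) res

def stepBig (mh : Int) (st : List (Int × Int × Int) × List Int × Int) (n : Int) :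
    List (Int × Int × Int) × List Int × Int :=
  let counts := stepB mh st.2.1
  let fact := if n > 0 then st.2.2 * n else st.2.2
  (rowOutB mh n counts fact st.1, counts, fact)

lemma alt_eq (mn mh : Int) : bar_chain_table_alt mn mh =
    if mn < 0 ∨ mh < 1 then [] else
      ((PySem.List.pyRange 0 (min mn (mh - 1) + 1) 1).foldl (stepBig mh)
        ([], (List.replicate (mh+1).toNat 0).set 0 1, 1)).1 := rfl

def rowOutA (mh n : Int) (res : List (Int × Int × Int)) : List (Int × Int × Int) :=
  (PySem.List.pyRange (n+1) (mh+1) 1).foldl (fun res h =>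
    let d := bar_chain_dim_y111 n h mh
    if d > 0 then res ++ [(n, h, d)] else res) res

lemma table_eq (mn mh : Int) : bar_chain_table mn mh =
    (PySem.List.pyRange 0 (mn+1) 1).foldl (fun res n => rowOutA mh n res) [] := rfl


lemma pvGetDSetEq (xs : List Int) (i : Nat) (v : Int) (h : i < xs.length) :
    (xs.set i v).getD i 0 = v := by
  simp [List.getD, h]

lemma pvGetDSetNe (xs : List Int) (i : Nat) (v : Int) (j : Nat) (h : j ≠ i) :
    (xs.set i v).getD j 0 = xs.getD j 0 := by
  simp [List.getD, h.symm]

lemma pvGetDReplicate (n j : Nat) : (List.replicate n (0:Int)).getD j 0 = 0 := by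
  simp [List.getD, List.getElem?_replicate]
  split <;> simp

lemma getD_foldl_insert_fn (ks : List Int) (f : Int → Int) :
    ∀ (d : PySem.Dict Int Int) (x : Int),
      (ks.foldl (fun d k => d.insert k (f k)) d).getD x 0
        = if x ∈ ks then f x else d.getD x 0 := by
  induction ks with
  | nil => intro d x; simp
  | cons k ks ih =>
    intro d x
    rw [List.foldl_cons, ih, PySem.Dict.getD_insert]
    by_cases hx : x ∈ ks
    · simp [hx]
    · by_cases hk : x = k <;> simp [hx, hk]

lemma vb_lookup (mh hw : Int) (h1 : 1 ≤ hw) (h2 : hw ≤ mh) :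
    (vbar_dims mh).getD hw 0 = vbf mh hw := by
  show ((PySem.List.pyRange 1 (mh+1) 1).foldl
      (fun r h => r.insert h ((vacuum_module_dims mh).getD h 0)) PySem.Dict.empty).getD hw 0 = _
  rw [getD_foldl_insert_fn (f := fun h => (vacuum_module_dims mh).getD h 0),
    if_pos (PySem.List.mem_pyRange_one.mpr ⟨h1, by omega⟩)]
  show ((PySem.List.pyRange 0 (mh+1) 1).foldl
      (fun d h => d.insert h ((pvTotal mh).getD h.toNat 0)) PySem.Dict.empty).getD hw 0 = _
  rw [getD_foldl_insert_fn (f := fun h => (pvTotal mh).getD h.toNat 0),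
    if_pos (PySem.List.mem_pyRange_one.mpr ⟨by omega, by omega⟩)]
  rfl

lemma innerA (vb : PySem.Dict Int Int) (h hp cp : Int) :
    ∀ (L : Nat) (a : Int) (curr : PySem.Dict Int Int), 1 ≤ a →
      L = (h - hp + 1 - a).toNat → curr.keys.Nodup →
      (let r := (PySem.List.pyRange a (h - hp + 1) 1).foldl (stA vb h hp cp) (curr, false)
       r.2 = false ∧ r.1.keys.Nodup ∧
       (∀ key ∈ r.1.keys, key ∈ curr.keys ∨ (hp + 1 ≤ key ∧ key ≤ h)) ∧
       (∀ x : Int, r.1.getD x 0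
          = curr.getD x 0 + (if hp + a ≤ x ∧ x ≤ h then cp * vb.getD (x - hp) 0 else 0))) := by
  intro L
  induction L with
  | zero =>
    intro a curr ha hL hnd
    rw [PySem.List.pyRange_one_eq_nil (by omega)]
    refine ⟨rfl, hnd, fun key hk => Or.inl hk, fun x => ?_⟩
    rw [if_neg (by omega), add_zero]
    rfl
  | succ L ih =>
    intro a curr ha hL hnd
    have hab : a < h - hp + 1 := by omega
    rw [PySem.List.pyRange_one_cons hab, List.foldl_cons]
    by_cases hdw : vb.getD a 0 = 0
    · have hst : stA vb h hp cp (curr, false) a = (curr, false) := by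
        simp [stA, hdw]
      rw [hst]
      obtain ⟨h1, h2, h3, h4⟩ := ih (a+1) curr (by omega) (by omega) hnd
      refine ⟨h1, h2, h3, fun x => ?_⟩
      rw [h4 x]
      by_cases hx : x = hp + a
      · subst hx
        rw [if_neg (by omega), if_pos ⟨by omega, by omega⟩]
        have hxa : hp + a - hp = a := by omega
        rw [hxa, hdw, mul_zero]
      · by_cases hc : hp + a ≤ x ∧ x ≤ h
        · rw [if_pos (by omega), if_pos hc]
        · rw [if_neg (by omega), if_neg hc]
    · have hst : stA vb h hp cp (curr, false) a
          = (curr.insert (hp + a) (curr.getD (hp + a) 0 + cp * vb.getD a 0), false) := by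
        simp only [stA]
        rw [if_neg (by simp), if_neg hdw, if_neg (by omega)]
      rw [hst]
      obtain ⟨h1, h2, h3, h4⟩ := ih (a+1) _ (by omega) (by omega)
        (PySem.Dict.nodup_keys_insert _ _ _ hnd)
      refine ⟨h1, h2, fun key hk => ?_, fun x => ?_⟩
      · rcases h3 key hk with hk' | hk'
        · rw [PySem.Dict.mem_keys_insert] at hk'
          rcases hk' with hk' | hk'
          · exact Or.inr ⟨by omega, by omega⟩
          · exact Or.inl hk'
        · exact Or.inr ⟨by omega, hk'.2⟩
      · rw [h4 x, PySem.Dict.getD_insert]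
        by_cases hx : x = hp + a
        · rw [if_pos hx, if_neg (by omega), if_pos ⟨by omega, by omega⟩]
          have hxa : x - hp = a := by omega
          rw [hxa, add_zero, hx]
        · rw [if_neg hx]
          by_cases hc : hp + a ≤ x ∧ x ≤ h
          · rw [if_pos (by omega), if_pos hc]
          · rw [if_neg (by omega), if_neg hc]

lemma itemsA (vb : PySem.Dict Int Int) (h : Int) :
    ∀ (items : List (Int × Int)) (curr : PySem.Dict Int Int), curr.keys.Nodup →
      (∀ p ∈ items, 0 ≤ p.1) →
      (let r := items.foldl (rowA vb h) curr
       r.keys.Nodup ∧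
       (∀ key ∈ r.keys, key ∈ curr.keys ∨ (1 ≤ key ∧ key ≤ h)) ∧
       (∀ x : Int, r.getD x 0 = curr.getD x 0 +
          (items.map (fun p => if p.1 + 1 ≤ x ∧ x ≤ h then p.2 * vb.getD (x - p.1) 0 else 0)).sum)) := by
  intro items
  induction items with
  | nil => intro curr hnd _; exact ⟨hnd, fun key hk => Or.inl hk, fun x => by simp⟩
  | cons p items ih =>
    intro curr hnd hpos
    rw [List.foldl_cons]
    obtain ⟨i1, i2, i3, i4⟩ := innerA vb h p.1 p.2 ((h - p.1 + 1 - 1).toNat) 1 curr (by omega) rfl hnd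
    obtain ⟨j1, j2, j3⟩ := ih (rowA vb h curr p) i2 (fun q hq => hpos q (List.mem_cons_of_mem _ hq))
    have hp1 : 0 ≤ p.1 := hpos p (List.mem_cons_self)
    refine ⟨j1, fun key hk => ?_, fun x => ?_⟩
    · rcases j2 key hk with hk' | hk'
      · rcases i3 key hk' with hk'' | hk''
        · exact Or.inl hk''
        · exact Or.inr ⟨by omega, hk''.2⟩
      · exact Or.inr hk'
    · rw [j3 x, List.map_cons, List.sum_cons]
      have := i4 x
      rw [show rowA vb h curr p = ((PySem.List.pyRange 1 (h - p.1 + 1) 1).foldl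
        (stA vb h p.1 p.2) (curr, false)).1 from rfl, this]
      ring

lemma sum_map_filter_ne (G : Int → Int) (l : List Int) :
    (l.map G).sum = ((l.filter (fun i => decide (G i ≠ 0))).map G).sum := by
  induction l with
  | nil => rfl
  | cons a l ih =>
    by_cases ha : G a = 0 <;> simp [ha, ih]

lemma sum_map_eq_of_nodup (G : Int → Int) (l m : List Int) (hl : l.Nodup) (hm : m.Nodup)
    (hmem : ∀ i, G i ≠ 0 → (i ∈ l ↔ i ∈ m)) : (l.map G).sum = (m.map G).sum := by
  rw [sum_map_filter_ne, sum_map_filter_ne G m]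
  have hperm : (l.filter (fun i => decide (G i ≠ 0))).Perm (m.filter (fun i => decide (G i ≠ 0))) := by
    apply List.perm_of_nodup_nodup_toFinset_eq (hl.filter _) (hm.filter _)
    ext i
    simp only [List.toFinset_filter, Finset.mem_filter, List.mem_toFinset]
    constructor
    · rintro ⟨hi, hG⟩; exact ⟨(hmem i (by simpa using hG)).mp hi, hG⟩
    · rintro ⟨hi, hG⟩; exact ⟨(hmem i (by simpa using hG)).mpr hi, hG⟩
  exact (hperm.map G).sum_eq

lemma roundA_inv (mh h : Int) (hhm : h ≤ mh) (k : Nat) (d : PySem.Dict Int Int)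
    (hnd : d.keys.Nodup) (hkeys : ∀ key ∈ d.keys, 0 ≤ key ∧ key ≤ h)
    (hval : ∀ x : Int, d.getD x 0 = if 0 ≤ x ∧ x ≤ h then Tup mh k x else 0) :
    (roundA (vbar_dims mh) h d).keys.Nodup ∧
    (∀ key ∈ (roundA (vbar_dims mh) h d).keys, 0 ≤ key ∧ key ≤ h) ∧
    (∀ x : Int, (roundA (vbar_dims mh) h d).getD x 0
        = if 0 ≤ x ∧ x ≤ h then Tup mh (k+1) x else 0) := by
  obtain ⟨i1, i2, i3⟩ := itemsA (vbar_dims mh) h d.items PySem.Dict.empty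
    (by simp [PySem.Dict.keys_empty]) (fun p hp => (hkeys p.1 (PySem.Dict.mem_keys_of_mem_items _ hp)).1)
  refine ⟨i1, fun key hk => ?_, fun x => ?_⟩
  · rcases i2 key hk with hk' | hk'
    · simp [PySem.Dict.keys_empty] at hk'
    · exact ⟨by omega, hk'.2⟩
  · rw [show roundA (vbar_dims mh) h d = d.items.foldl (rowA (vbar_dims mh) h) PySem.Dict.empty from rfl,
      i3 x, PySem.Dict.getD_empty, zero_add]
    by_cases hx : 0 ≤ x ∧ x ≤ h
    · rw [if_pos hx]
      have hmap : d.items.map (fun p => if p.1 + 1 ≤ x ∧ x ≤ h then p.2 * (vbar_dims mh).getD (x - p.1) 0 else 0)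
          = d.keys.map (fun i => if 0 ≤ i ∧ i + 1 ≤ x then Tup mh k i * vbf mh (x - i) else 0) := by
        simp only [PySem.Dict.keys, List.map_map]
        apply List.map_eq_map_iff.mpr
        intro p hp
        have hkey := hkeys p.1 (PySem.Dict.mem_keys_of_mem_items _ hp)
        have hval2 : p.2 = Tup mh k p.1 := by
          have hg := PySem.Dict.getD_of_mem_items d (by simpa using hp) hnd 0
          rw [hval p.1, if_pos ⟨hkey.1, hkey.2⟩] at hg
          omega
        by_cases hc : p.1 + 1 ≤ x
        · simp only [Function.comp]
          rw [if_pos ⟨hc, hx.2⟩, if_pos ⟨hkey.1, hc⟩, hval2,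
            vb_lookup mh (x - p.1) (by omega) (by omega)]
        · simp only [Function.comp]
          rw [if_neg (by omega), if_neg (by omega)]
      rw [hmap]
      have hsum := sum_map_eq_of_nodup
        (fun i => if 0 ≤ i ∧ i + 1 ≤ x then Tup mh k i * vbf mh (x - i) else 0)
        d.keys (PySem.List.pyRange 0 x 1) hnd (PySem.List.nodup_pyRange_one 0 x)
        (fun i hG => by
          constructor
          · intro hi
            have : 0 ≤ i ∧ i + 1 ≤ x := by
              by_contra hc
              exact hG (show (if 0 ≤ i ∧ i + 1 ≤ x then Tup mh k i * vbf mh (x - i) else 0) = 0 from if_neg hc)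
            exact PySem.List.mem_pyRange_one.mpr ⟨this.1, by omega⟩
          · intro hi
            have hi' := PySem.List.mem_pyRange_one.mp hi
            by_contra hcon
            have hcont : d.getD i 0 = 0 := by
              apply PySem.Dict.getD_of_not_contains
              rw [Bool.eq_false_iff]
              intro hcc
              exact hcon ((PySem.Dict.contains_iff_mem_keys d i).mp hcc)
            rw [hval i, if_pos ⟨hi'.1, by omega⟩] at hcont
            apply hG
            show (if 0 ≤ i ∧ i + 1 ≤ x then Tup mh k i * vbf mh (x - i) else 0) = 0
            rw [if_pos ⟨hi'.1, by omega⟩, hcont, zero_mul])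
      rw [hsum]
      show _ = Tup mh (k+1) x
      rw [show Tup mh (k+1) x
          = ((PySem.List.pyRange 0 x 1).map (fun i => Tup mh k i * vbf mh (x - i))).sum from rfl]
      congr 1
      apply List.map_eq_map_iff.mpr
      intro i hi
      have hi' := PySem.List.mem_pyRange_one.mp hi
      rw [if_pos ⟨hi'.1, by omega⟩]
    · rw [if_neg hx]
      apply List.sum_eq_zero
      intro y hy
      rw [List.mem_map] at hy
      obtain ⟨p, hp, rfl⟩ := hy
      have hkey := hkeys p.1 (PySem.Dict.mem_keys_of_mem_items _ hp)
      rw [if_neg (by omega)]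

lemma roundsA (mh h : Int) (hhm : h ≤ mh) :
    ∀ (l : List Int) (k : Nat) (d : PySem.Dict Int Int), d.keys.Nodup →
      (∀ key ∈ d.keys, 0 ≤ key ∧ key ≤ h) →
      (∀ x : Int, d.getD x 0 = if 0 ≤ x ∧ x ≤ h then Tup mh k x else 0) →
      (let r := l.foldl (fun prev _ => roundA (vbar_dims mh) h prev) d
       r.keys.Nodup ∧ (∀ key ∈ r.keys, 0 ≤ key ∧ key ≤ h) ∧
       (∀ x : Int, r.getD x 0 = if 0 ≤ x ∧ x ≤ h then Tup mh (k + l.length) x else 0)) := by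
  intro l
  induction l with
  | nil => intro k d h1 h2 h3; exact ⟨h1, h2, by simpa using h3⟩
  | cons a l ih =>
    intro k d h1 h2 h3
    obtain ⟨r1, r2, r3⟩ := roundA_inv mh h hhm k d h1 h2 h3
    obtain ⟨s1, s2, s3⟩ := ih (k+1) _ r1 r2 r3
    refine ⟨s1, s2, fun x => ?_⟩
    rw [List.foldl_cons, s3 x]
    have : k + 1 + l.length = k + (a :: l).length := by simp; omega
    rw [this]

lemma dimA (mh n h : Int) (hn : 0 ≤ n) (hh1 : n + 1 ≤ h) (hhm : h ≤ mh) :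
    bar_chain_dim_y111 n h mh = Tup mh (n+1).toNat h * pyFactorial n := by
  rw [dim_eq_rounds, if_neg (by omega)]
  have hbase : ∀ x : Int, (PySem.Dict.mk [((0:Int), (1:Int))]).getD x 0
      = if 0 ≤ x ∧ x ≤ h then Tup mh 0 x else 0 := by
    intro x
    rw [show (PySem.Dict.mk [((0:Int), (1:Int))]) = PySem.Dict.empty.insert 0 1 from rfl,
      PySem.Dict.getD_insert, PySem.Dict.getD_empty]
    by_cases hx : x = 0
    · rw [if_pos hx, if_pos (by constructor <;> omega),
        show Tup mh 0 x = if x = 0 then 1 else 0 from rfl, if_pos hx]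
    · rw [if_neg hx]
      by_cases hx2 : 0 ≤ x ∧ x ≤ h
      · rw [if_pos hx2, show Tup mh 0 x = if x = 0 then 1 else 0 from rfl, if_neg hx]
      · rw [if_neg hx2]
  obtain ⟨r1, r2, r3⟩ := roundsA mh h hhm (PySem.List.pyRange 0 (n+1) 1) 0
    (PySem.Dict.mk [((0:Int), (1:Int))]) (by simp [PySem.Dict.keys]) (by
      intro key hk
      simp [PySem.Dict.keys] at hk
      subst hk
      exact ⟨le_refl 0, by omega⟩) hbase
  rw [r3 h, if_pos ⟨by omega, le_refl h⟩, PySem.List.length_pyRange_one]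
  have hl : (n + 1 - 0).toNat = (n+1).toNat := by omega
  rw [hl, Nat.zero_add]
  by_cases hn0 : n > 0
  · rw [if_pos hn0]
  · rw [if_neg hn0]
    have hn' : n = 0 := by omega
    subst hn'
    have : pyFactorial 0 = 1 := by
      show (PySem.List.pyRange 1 1 1).foldl (· * ·) 1 = 1
      rw [PySem.List.pyRange_one_eq_nil (by omega)]
      rfl
    rw [this]

lemma innerB (mh w c : Int) (hw0 : 0 ≤ w) :
    ∀ (L : Nat) (a : Int) (new : List Int), 1 ≤ a → L = (mh + 1 - w - a).toNat →
      new.length = (mh+1).toNat →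
      (let r := (PySem.List.pyRange a (mh + 1 - w) 1).foldl (stB mh c w) new
       r.length = (mh+1).toNat ∧ ∀ x : Int, 0 ≤ x → x ≤ mh →
         r.getD x.toNat 0 = new.getD x.toNat 0
           + (if w + a ≤ x then c * (pvTotal mh).getD (x - w).toNat 0 else 0)) := by
  intro L
  induction L with
  | zero =>
    intro a new ha hL hlen
    rw [PySem.List.pyRange_one_eq_nil (by omega)]
    exact ⟨hlen, fun x hx1 hx2 => by rw [if_neg (by omega), add_zero]; rfl⟩
  | succ L ih =>
    intro a new ha hL hlen
    have hab : a < mh + 1 - w := by omega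
    rw [PySem.List.pyRange_one_cons hab, List.foldl_cons]
    have hidx : (w+a).toNat < new.length := by rw [hlen]; omega
    obtain ⟨j1, j2⟩ := ih (a+1) (stB mh c w new a) (by omega) (by omega)
      (by rw [show stB mh c w new a = new.set (w+a).toNat _ from rfl, List.length_set]; exact hlen)
    refine ⟨j1, fun x hx1 hx2 => ?_⟩
    rw [j2 x hx1 hx2]
    rw [show stB mh c w new a = new.set (w+a).toNat
      (new.getD (w+a).toNat 0 + c * (pvTotal mh).getD a.toNat 0) from rfl]
    by_cases hx : x = w + a
    · have hnat : x.toNat = (w+a).toNat := by omega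
      rw [hnat, pvGetDSetEq _ _ _ hidx, if_neg (by omega), add_zero,
        if_pos (by omega)]
      have : (x - w).toNat = a.toNat := by omega
      rw [this]
    · have hnat : x.toNat ≠ (w+a).toNat := by omega
      rw [pvGetDSetNe _ _ _ _ hnat]
      by_cases hc : w + a ≤ x
      · rw [if_pos (by omega), if_pos hc]
      · rw [if_neg (by omega), if_neg hc]

lemma colBs (mh : Int) (cnts : List Int) :
    ∀ (L : Nat) (a : Int) (new : List Int), 0 ≤ a → L = (mh + 1 - a).toNat →
      new.length = (mh+1).toNat →
      (let r := (PySem.List.pyRange a (mh+1) 1).foldl (colB mh cnts) new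
       r.length = (mh+1).toNat ∧ ∀ x : Int, 0 ≤ x → x ≤ mh →
         r.getD x.toNat 0 = new.getD x.toNat 0
           + ((PySem.List.pyRange a (mh+1) 1).map (fun w =>
               if w + 1 ≤ x then cnts.getD w.toNat 0 * (pvTotal mh).getD (x - w).toNat 0 else 0)).sum) := by
  intro L
  induction L with
  | zero =>
    intro a new ha hL hlen
    rw [PySem.List.pyRange_one_eq_nil (by omega)]
    exact ⟨hlen, fun x hx1 hx2 => by simp⟩
  | succ L ih =>
    intro a new ha hL hlen
    have hab : a < mh + 1 := by omega
    rw [PySem.List.pyRange_one_cons hab, List.foldl_cons]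
    simp only [List.map_cons, List.sum_cons]
    by_cases hc : cnts.getD a.toNat 0 = 0
    · have hcol : colB mh cnts new a = new := by
        simp only [colB]
        rw [if_neg (by simpa using hc)]
      rw [hcol]
      obtain ⟨j1, j2⟩ := ih (a+1) new (by omega) (by omega) hlen
      refine ⟨j1, fun x hx1 hx2 => ?_⟩
      rw [j2 x hx1 hx2, hc]
      by_cases hax : a + 1 ≤ x
      · rw [if_pos hax, zero_mul]; ring
      · rw [if_neg hax]; ring
    · have hcol : colB mh cnts new a
          = (PySem.List.pyRange 1 (mh + 1 - a) 1).foldl (stB mh (cnts.getD a.toNat 0) a) new := by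
        simp only [colB]
        rw [if_pos (by simpa using hc)]
      rw [hcol]
      obtain ⟨i1, i2⟩ := innerB mh a (cnts.getD a.toNat 0) ha ((mh + 1 - a - 1).toNat) 1 new
        (by omega) rfl hlen
      obtain ⟨j1, j2⟩ := ih (a+1) _ (by omega) (by omega) i1
      refine ⟨j1, fun x hx1 hx2 => ?_⟩
      rw [j2 x hx1 hx2, i2 x hx1 hx2]
      ring

lemma stepB_val (mh : Int) (hmh : 1 ≤ mh) (k : Nat) (cnts : List Int)
    (hval : ∀ x : Int, 0 ≤ x → x ≤ mh → cnts.getD x.toNat 0 = Tup mh k x) :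
    (stepB mh cnts).length = (mh+1).toNat ∧
    (∀ x : Int, 0 ≤ x → x ≤ mh → (stepB mh cnts).getD x.toNat 0 = Tup mh (k+1) x) := by
  obtain ⟨j1, j2⟩ := colBs mh cnts ((mh + 1).toNat) 0 (List.replicate (mh+1).toNat 0)
    (by omega) (by omega) (List.length_replicate)
  refine ⟨j1, fun x hx1 hx2 => ?_⟩
  rw [show stepB mh cnts = (PySem.List.pyRange 0 (mh+1) 1).foldl (colB mh cnts)
    (List.replicate (mh+1).toNat 0) from rfl, j2 x hx1 hx2]
  rw [pvGetDReplicate, zero_add]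
  rw [PySem.List.pyRange_one_append 0 x (mh+1) hx1 (by omega), List.map_append, List.sum_append]
  have hz : ((PySem.List.pyRange x (mh+1) 1).map (fun w =>
      if w + 1 ≤ x then cnts.getD w.toNat 0 * (pvTotal mh).getD (x - w).toNat 0 else 0)).sum = 0 := by
    apply List.sum_eq_zero
    intro y hy
    rw [List.mem_map] at hy
    obtain ⟨w, hw, rfl⟩ := hy
    have hw' := PySem.List.mem_pyRange_one.mp hw
    rw [if_neg (by omega)]
  rw [hz, add_zero]
  rw [show Tup mh (k+1) x
      = ((PySem.List.pyRange 0 x 1).map (fun i => Tup mh k i * vbf mh (x - i))).sum from rfl]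
  congr 1
  apply List.map_eq_map_iff.mpr
  intro w hw
  have hw' := PySem.List.mem_pyRange_one.mp hw
  rw [if_pos (by omega), hval w hw'.1 (by omega)]
  rfl

lemma fact_step (n : Int) (hn : 0 ≤ n) :
    (if n > 0 then pyFactorial (n-1) * n else pyFactorial (n-1)) = pyFactorial n := by
  by_cases h : 0 < n
  · rw [if_pos h]
    unfold pyFactorial
    rw [PySem.List.pyRange_one_succ_right (by omega : (1:Int) ≤ n), List.foldl_append]
    have he : n - 1 + 1 = n := by omega
    rw [he]
    rfl
  · have hn' : n = 0 := by omega
    subst hn'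
    rw [if_neg h]
    unfold pyFactorial
    rw [PySem.List.pyRange_one_eq_nil (by omega), PySem.List.pyRange_one_eq_nil (by omega)]

lemma mainLoop (mh : Int) (hmh : 1 ≤ mh) :
    ∀ N : Nat,
      (let st := (PySem.List.pyRange 0 (N:Int) 1).foldl (stepBig mh)
          ([], (List.replicate (mh+1).toNat 0).set 0 1, 1)
       st.1 = (PySem.List.pyRange 0 (N:Int) 1).foldl (fun res n => rowOutA mh n res) [] ∧
       st.2.1.length = (mh+1).toNat ∧
       (∀ x : Int, 0 ≤ x → x ≤ mh → st.2.1.getD x.toNat 0 = Tup mh N x) ∧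
       st.2.2 = pyFactorial ((N:Int) - 1)) := by
  intro N
  induction N with
  | zero =>
    rw [show ((0:Nat):Int) = 0 from rfl, PySem.List.pyRange_one_eq_nil (by omega)]
    simp only [List.foldl_nil]
    refine ⟨by trivial, ?_, fun x hx1 hx2 => ?_, ?_⟩
    · show ((List.replicate (mh+1).toNat (0:Int)).set 0 1).length = _
      rw [List.length_set, List.length_replicate]
    · show ((List.replicate (mh+1).toNat (0:Int)).set 0 1).getD x.toNat 0 = _
      by_cases hx : x = 0
      · subst hx
        rw [show (0:Int).toNat = 0 from rfl,
          pvGetDSetEq _ _ _ (by rw [List.length_replicate]; omega)]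
        rfl
      · rw [pvGetDSetNe _ _ _ _ (by omega), pvGetDReplicate]
        rw [show Tup mh 0 x = if x = 0 then 1 else 0 from rfl, if_neg hx]
    · show (1:Int) = pyFactorial (0 - 1)
      unfold pyFactorial
      rw [PySem.List.pyRange_one_eq_nil (by omega)]
      rfl
  | succ N ih =>
    have hcast : ((N+1:Nat):Int) = (N:Int) + 1 := by push_cast; ring
    rw [hcast, PySem.List.pyRange_one_succ_right (by positivity), List.foldl_append,
      List.foldl_append]
    obtain ⟨ih1, ih2, ih3, ih4⟩ := ih
    simp only [List.foldl_cons, List.foldl_nil]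
    set st := (PySem.List.pyRange 0 (N:Int) 1).foldl (stepBig mh)
      ([], (List.replicate (mh+1).toNat 0).set 0 1, 1) with hst
    obtain ⟨c1, c2⟩ := stepB_val mh hmh N st.2.1 ih3
    have hfact : (if (N:Int) > 0 then st.2.2 * (N:Int) else st.2.2) = pyFactorial (N:Int) := by
      rw [ih4, ← fact_step (N:Int) (by positivity)]
    refine ⟨?_, ?_, fun x hx1 hx2 => ?_, ?_⟩
    · show rowOutB mh (N:Int) (stepB mh st.2.1) _ st.1 = rowOutA mh (N:Int) _
      rw [ih1]
      show rowOutB mh (N:Int) (stepB mh st.2.1)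
          (if (N:Int) > 0 then st.2.2 * (N:Int) else st.2.2) _ = _
      rw [hfact]
      apply PySem.List.foldl_congr_mem
      intro acc h hmem
      have hh := PySem.List.mem_pyRange_one.mp hmem
      have hd : (stepB mh st.2.1).getD h.toNat 0 * pyFactorial (N:Int)
          = bar_chain_dim_y111 (N:Int) h mh := by
        rw [c2 h (by omega) (by omega),
          dimA mh (N:Int) h (by positivity) (by omega) (by omega)]
        have : (((N:Int))+1).toNat = N + 1 := by omega
        rw [this]
      simp only
      rw [hd]
    · exact c1
    · exact c2 x hx1 hx2
    · show (if (N:Int) > 0 then st.2.2 * (N:Int) else st.2.2) = pyFactorial ((N:Int) + 1 - 1)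
      rw [hfact]
      congr 1
      omega

-- ===== VERDICT (by name: the statement is the Claim_ definition above) =====
theorem bar_chain_table_spec : Claim_equal_bar_chain_table := by
  intro mn mh _
  unfold Spec_bar_chain_table
  rw [table_eq, alt_eq]
  by_cases hmn : mn < 0
  · rw [if_pos (Or.inl hmn), PySem.List.pyRange_one_eq_nil (by omega)]
    rfl
  by_cases hmh : mh < 1
  · rw [if_pos (Or.inr hmh)]
    have hrow : ∀ (res : List (Int × Int × Int)) (n : Int), n ∈ PySem.List.pyRange 0 (mn+1) 1 →
        rowOutA mh n res = res := by
      intro res n hn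
      have hn' := (PySem.List.mem_pyRange_one.mp hn).1
      show (PySem.List.pyRange (n+1) (mh+1) 1).foldl _ res = res
      rw [PySem.List.pyRange_one_eq_nil (by omega)]
      rfl
    rw [PySem.List.foldl_congr_mem (PySem.List.pyRange 0 (mn+1) 1)
      (fun res n => rowOutA mh n res) (fun res _ => res) []
      (fun acc x hx => hrow acc x hx), PySem.List.foldl_ignore]
  · rw [if_neg (by omega : ¬ (mn < 0 ∨ mh < 1))]
    -- A's rows with n ≥ max_h are empty; split A's loop at min mn (mh-1) + 1
    · have hm0 : 0 ≤ min mn (mh - 1) := by omega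
      rw [PySem.List.pyRange_one_append 0 (min mn (mh - 1) + 1) (mn + 1) (by omega) (by omega),
        List.foldl_append]
      have htail : ∀ (res : List (Int × Int × Int)) (n : Int),
          n ∈ PySem.List.pyRange (min mn (mh - 1) + 1) (mn + 1) 1 → rowOutA mh n res = res := by
        intro res n hn
        have hn' := PySem.List.mem_pyRange_one.mp hn
        show (PySem.List.pyRange (n+1) (mh+1) 1).foldl _ res = res
        rw [PySem.List.pyRange_one_eq_nil (by omega)]
        rfl
      rw [PySem.List.foldl_congr_mem (PySem.List.pyRange (min mn (mh - 1) + 1) (mn + 1) 1)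
        (fun res n => rowOutA mh n res) (fun res _ => res) _
        (fun acc x hx => htail acc x hx), PySem.List.foldl_ignore]
      have hN : ((((min mn (mh - 1)) + 1).toNat : Nat) : Int) = min mn (mh - 1) + 1 := by omega
      obtain ⟨m1, _, _, _⟩ := mainLoop mh (by omega) ((min mn (mh - 1)) + 1).toNat
      rw [hN] at m1
      exact m1.symm
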